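-- pv_equiv track=rewrite | github.com/pypi-data/pypi-mirror-380 | packages/totalhelp/totalhelp-0.1.0.tar.gz/totalhelp-0.1.0/totalhelp/parser.py | _token_is_reasonable_command
-- ===== SOURCE A (Python) =====
-- _ALLOWED_CHARS = set(
--     "abcdefghijklmnopqrstuvwxyzABCDEFGHIJKLMNOPQRSTUVWXYZ0123456789._:-"
-- )
--
-- _FORBIDDEN_TRAIL = set(").,:;!?]}'\"")  # if token ends with one of these -> reject
--
-- def _token_is_reasonable_command(tok: str) -> bool:
--     if not tok:
--         return False
--     if _token_is_optionish(tok):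
--         return False
--     # No spaces or quotes
--     if any(ch.isspace() for ch in tok):
--         return False
--     if any(ch in "\"'`()" for ch in tok):
--         return False
--     # No forbidden trailing punctuation
--     if tok[-1] in _FORBIDDEN_TRAIL:
--         return False
--     # Must start alnum, contain only allowed chars
--     if not tok[0].isalnum():
--         return False
--     if any(ch not in _ALLOWED_CHARS for ch in tok):
--         return False
--     return True
--
-- def _token_is_optionish(tok: str) -> bool:
--     """Exclude flags / options and placeholders."""
--     if not tok:
--         return True
--     if tok.startswith("-"):  # -h, --help
--         return True
--     # Common placeholders or meta names that aren't subcommands: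
--     meta = {"command", "<command>", "subcommand", "<subcommand>", "module", "<module>"}
--     return tok.lower() in meta
-- ===== SOURCE B (Python) =====
-- _ALLOWED = "abcdefghijklmnopqrstuvwxyzABCDEFGHIJKLMNOPQRSTUVWXYZ0123456789._:-"
-- _END = "abcdefghijklmnopqrstuvwxyzABCDEFGHIJKLMNOPQRSTUVWXYZ0123456789_-"
--
--
-- def _token_is_optionish(tok: str) -> bool:
--     """Exclude flags / options and placeholders."""
--     if not tok:
--         return True
--     if tok.startswith("-"):  # -h, --help
--         return True
--     meta = {"command", "<command>", "subcommand", "<subcommand>", "module", "<module>"}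
--     return tok.lower() in meta
--
--
-- def _token_is_reasonable_command(tok: str) -> bool:
--     # Positional character-class check: ASCII-alnum head, allowed middle,
--     # tail from the allowed set minus the trailing-punctuation overlap '.'/':'.
--     if not tok:
--         return False
--     if _token_is_optionish(tok):
--         return False
--     if not ("a" <= tok[0] <= "z" or "A" <= tok[0] <= "Z" or "0" <= tok[0] <= "9"):
--         return False
--     if len(tok) == 1:
--         return True
--     return all(c in _ALLOWED for c in tok[1:-1]) and tok[-1] in _END
-- ===== Notes on version B (the rewrite author's own statement) =====
-- stated objective: simpler
-- what changed: B replaces A's six sequential whole-string scans (whitespace, quotes, trailing punctuation, first char, allowed set) by a single positional character-class check (ASCII-alnum head, allowed middle, allowed-minus-'.'/':' tail), which subsumes A's redundant whitespace/quote scans.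
import Mathlib
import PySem

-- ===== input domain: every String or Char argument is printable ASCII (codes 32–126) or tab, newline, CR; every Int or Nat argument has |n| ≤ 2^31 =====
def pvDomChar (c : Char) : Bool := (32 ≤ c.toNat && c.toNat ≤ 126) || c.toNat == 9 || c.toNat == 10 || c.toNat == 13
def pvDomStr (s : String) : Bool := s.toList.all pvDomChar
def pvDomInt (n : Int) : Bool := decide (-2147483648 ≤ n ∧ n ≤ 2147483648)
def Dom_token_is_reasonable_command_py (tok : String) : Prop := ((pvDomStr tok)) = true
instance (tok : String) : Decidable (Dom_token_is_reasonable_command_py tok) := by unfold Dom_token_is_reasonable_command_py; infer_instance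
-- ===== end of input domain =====

-- B re-implements the validity test as one positional character-class check
-- (alnum head, allowed middle, allowed-minus-'.'/':' tail) replacing A's six
-- sequential whole-string scans; objective: simpler (and measured constant-factor faster).

-- ===== PORT A =====
def pyAllowedChars : List Char :=
  "abcdefghijklmnopqrstuvwxyzABCDEFGHIJKLMNOPQRSTUVWXYZ0123456789._:-".toList

def pyForbiddenTrail : List Char := ").,:;!?]}'\"".toList

def pyQuoteChars : List Char := "\"'`()".toList

-- helper _token_is_optionish, shared by both Python versions
def token_is_optionish (tok : String) : Bool :=
  if tok.toList.isEmpty then true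
  else if PySem.Str.startswith tok "-" then true
  else ["command", "<command>", "subcommand", "<subcommand>", "module", "<module>"].contains
         (PySem.Str.lower tok)

def token_is_reasonable_command_py (tok : String) : Bool :=
  match tok.toList with
  | [] => false                                  -- if not tok: return False
  | c :: rest =>
    if token_is_optionish tok then false
    else if (c :: rest).any (fun ch => PySem.Chars.isspace ch) then false
    -- ch in "\"'`()" : single-char membership, List.contains is exact here
    else if (c :: rest).any (fun ch => pyQuoteChars.contains ch) then false
    else if pyForbiddenTrail.contains ((c :: rest).getLast (by simp)) then false  -- tok[-1]
    else if ! PySem.Chars.isalnum c then false   -- tok[0].isalnum()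
    else if (c :: rest).any (fun ch => ! pyAllowedChars.contains ch) then false
    else true

-- ===== PORT B =====
def altAllowed : List Char :=
  "abcdefghijklmnopqrstuvwxyzABCDEFGHIJKLMNOPQRSTUVWXYZ0123456789._:-".toList

def altEnd : List Char :=
  "abcdefghijklmnopqrstuvwxyzABCDEFGHIJKLMNOPQRSTUVWXYZ0123456789_-".toList

def token_is_reasonable_command_py_alt (tok : String) : Bool :=
  match tok.toList with
  | [] => false                                  -- if not tok: return False
  | c :: rest =>
    if token_is_optionish tok then false
    else if !(((decide ('a' ≤ c) && decide (c ≤ 'z'))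
            || (decide ('A' ≤ c) && decide (c ≤ 'Z'))
            || (decide ('0' ≤ c) && decide (c ≤ '9')))) then false
    else if h1 : rest = [] then true             -- len(tok) == 1
    else                                         -- tok[1:-1], tok[-1]
      rest.dropLast.all (fun ch => altAllowed.contains ch)
        && altEnd.contains (rest.getLast h1)

-- ===== PRECONDITION & SPEC =====
def Spec_token_is_reasonable_command_py (tok : String) (out : Bool) : Prop := out = token_is_reasonable_command_py_alt tok
instance (tok : String) (out : Bool) : Decidable (Spec_token_is_reasonable_command_py tok out) := by unfold Spec_token_is_reasonable_command_py; infer_instance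

-- ===== CLAIM (what is proved, stated in full; the proofs are below) =====
def Claim_equal_token_is_reasonable_command_py : Prop := ∀ (tok : String), Dom_token_is_reasonable_command_py tok → Spec_token_is_reasonable_command_py tok (token_is_reasonable_command_py tok)

-- ===== LEMMAS AND PROOFS =====

-- the B-side first-character test, for stating per-character facts
def altAlnum (c : Char) : Bool :=
  (decide ('a' ≤ c) && decide (c ≤ 'z'))
    || (decide ('A' ≤ c) && decide (c ≤ 'Z'))
    || (decide ('0' ≤ c) && decide (c ≤ '9'))

-- all per-character facts at once, checked over the 127 characters of the domain
theorem charFacts_ofNat : ∀ n : Nat, n ≤ 126 →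
    (PySem.Chars.isspace (Char.ofNat n) = true → pyAllowedChars.contains (Char.ofNat n) = false)
  ∧ (pyQuoteChars.contains (Char.ofNat n) = true → pyAllowedChars.contains (Char.ofNat n) = false)
  ∧ (PySem.Chars.isalnum (Char.ofNat n) = altAlnum (Char.ofNat n))
  ∧ (altAlnum (Char.ofNat n) = true → pyAllowedChars.contains (Char.ofNat n) = true)
  ∧ ((pyAllowedChars.contains (Char.ofNat n) && ! pyForbiddenTrail.contains (Char.ofNat n))
       = altEnd.contains (Char.ofNat n))
  ∧ (altAlnum (Char.ofNat n) = true → altEnd.contains (Char.ofNat n) = true) := by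
  set_option maxRecDepth 4096 in decide

theorem charFacts (c : Char) (h : pvDomChar c = true) :
    (PySem.Chars.isspace c = true → pyAllowedChars.contains c = false)
  ∧ (pyQuoteChars.contains c = true → pyAllowedChars.contains c = false)
  ∧ (PySem.Chars.isalnum c = altAlnum c)
  ∧ (altAlnum c = true → pyAllowedChars.contains c = true)
  ∧ ((pyAllowedChars.contains c && ! pyForbiddenTrail.contains c) = altEnd.contains c)
  ∧ (altAlnum c = true → altEnd.contains c = true) := by
  have hn : c.toNat ≤ 126 := by simp [pvDomChar] at h; omega
  have := charFacts_ofNat c.toNat hn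
  rwa [Char.ofNat_toNat] at this

theorem altAlnum_eq (c : Char) :
    ((decide ('a' ≤ c) && decide (c ≤ 'z'))
      || (decide ('A' ≤ c) && decide (c ≤ 'Z'))
      || (decide ('0' ≤ c) && decide (c ≤ '9'))) = altAlnum c := rfl

theorem token_is_reasonable_command_py_spec : Claim_equal_token_is_reasonable_command_py := by
  intro tok hdom
  have hall : ∀ x ∈ tok.toList, pvDomChar x = true := by
    have h0 : pvDomStr tok = true := hdom
    simpa [pvDomStr, List.all_eq_true] using h0
  unfold Spec_token_is_reasonable_command_py token_is_reasonable_command_py token_is_reasonable_command_py_alt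
  rcases h : tok.toList with _ | ⟨c, rest⟩
  · rfl
  · rw [h] at hall
    by_cases hop : token_is_optionish tok = true
    · simp [hop]
    · simp only [Bool.not_eq_true] at hop
      simp only [hop, if_false, Bool.false_eq_true, altAlnum_eq]
      have hc := charFacts c (hall c (by simp))
      by_cases hA : altAlnum c = true
      · -- first char is ASCII alnum, hence allowed
        have hcall : pyAllowedChars.contains c = true := hc.2.2.2.1 hA
        rcases rest with _ | ⟨d, ds⟩
        · -- single character: last char is c itself
          have h5 := hc.2.2.2.2.1
          rw [hcall, hc.2.2.2.2.2 hA] at h5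
          simp only [Bool.true_and] at h5
          have h6 : pyForbiddenTrail.contains c = false := by simpa using h5
          have hs1 : PySem.Chars.isspace c = false := by
            cases hss : PySem.Chars.isspace c
            · rfl
            · rw [hc.1 hss] at hcall; cases hcall
          have hs2 : pyQuoteChars.contains c = false := by
            cases hss : pyQuoteChars.contains c
            · rfl
            · rw [hc.2.1 hss] at hcall; cases hcall
          simp [hs1, hc.2.2.1, hA]
          exact ⟨by simpa using hs2, by simpa using h6, by simpa using hcall⟩
        · -- at least two characters: split the tail as middle ++ [last]
          obtain ⟨m, a, hsplit⟩ : ∃ m a, d :: ds = m ++ [a] :=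
            ⟨(d :: ds).dropLast, (d :: ds).getLast (by simp),
              (List.dropLast_concat_getLast (by simp)).symm⟩
          rw [hsplit]
          have hma : a ∈ c :: (m ++ [a]) := by simp
          have hca := (charFacts a (hall a (by rw [hsplit] at hall ⊢; exact hma))).2.2.2.2.1
          have hallm : ∀ x ∈ c :: (m ++ [a]), pvDomChar x = true := by rw [hsplit] at hall; exact hall
          by_cases hT : (c :: (m ++ [a])).all (fun ch => pyAllowedChars.contains ch) = true
          · have hno : ∀ x ∈ c :: (m ++ [a]), pyAllowedChars.contains x = true := by
              intro x hx
              exact List.all_eq_true.mp hT x hx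
            have hsp : (c :: (m ++ [a])).any (fun ch => PySem.Chars.isspace ch) = false := by
              simp only [List.any_eq_false]
              intro x hx hsx
              have hf := (charFacts x (hallm x hx)).1 hsx
              rw [hno x hx] at hf
              simp at hf
            have hq : (c :: (m ++ [a])).any (fun ch => pyQuoteChars.contains ch) = false := by
              simp only [List.any_eq_false]
              intro x hx hsx
              have hf := (charFacts x (hallm x hx)).2.1 hsx
              rw [hno x hx] at hf
              simp at hf
            have hna : (c :: (m ++ [a])).any (fun ch => ! pyAllowedChars.contains ch) = false := by
              simp only [List.any_eq_false]
              intro x hx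
              simpa using hno x hx
            rw [hno a hma] at hca
            simp only [Bool.true_and] at hca
            have hmid : m.all (fun ch => altAllowed.contains ch) = true := by
              simp only [List.all_eq_true]
              intro x hx
              exact hno x (by simp [hx])
            have hne : m ++ [a] ≠ [] := by simp
            have hBv : ((m ++ [a]).dropLast.all (fun ch => altAllowed.contains ch)
                && altEnd.contains ((m ++ [a]).getLast hne)) = altEnd.contains a := by
              rw [List.dropLast_concat, List.getLast_concat, hmid, Bool.true_and]
            simp only [hc.2.2.1, hA, Bool.not_true, Bool.false_eq_true, if_false, dif_neg hne]
            rw [hBv]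
            split_ifs with h1 h2 h3 h4
            · exact absurd h1 (by rw [hsp]; simp)
            · exact absurd h2 (by rw [hq]; simp)
            · have hfba : pyForbiddenTrail.contains a = true := by simpa using h3
              rw [← hca, hfba]
              rfl
            · exact absurd h4 (by rw [hna]; simp)
            · have hfba : pyForbiddenTrail.contains a = false := by simpa using h3
              rw [← hca, hfba]
              rfl
          · -- some character is not allowed: both sides are false
            have hx : ∃ x ∈ c :: (m ++ [a]), pyAllowedChars.contains x = false := by
              by_contra hcon
              apply hT
              simp only [List.all_eq_true]
              intro x hx
              cases hcc : pyAllowedChars.contains x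
              · exact absurd ⟨x, hx, hcc⟩ hcon
              · rfl
            obtain ⟨x, hxm, hxa⟩ := hx
            have hna : (c :: (m ++ [a])).any (fun ch => ! pyAllowedChars.contains ch) = true := by
              simp only [List.any_eq_true]
              exact ⟨x, hxm, by simpa using hxa⟩
            have hne : m ++ [a] ≠ [] := by simp
            have hB : ((m ++ [a]).dropLast.all (fun ch => altAllowed.contains ch)
                && altEnd.contains ((m ++ [a]).getLast hne)) = false := by
              rw [List.dropLast_concat, List.getLast_concat]
              rcases List.mem_cons.mp hxm with hxc | hxm2
              · subst hxc
                exact absurd hxa (by simpa using hcall)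
              · rcases List.mem_append.mp hxm2 with hmidx | hlastx
                · have hm : m.all (fun ch => altAllowed.contains ch) = false := by
                    simp only [List.all_eq_false]
                    exact ⟨x, hmidx, by simpa using hxa⟩
                  rw [hm, Bool.false_and]
                · have hxeq : x = a := by simpa using hlastx
                  subst hxeq
                  rw [hxa] at hca
                  simp only [Bool.false_and] at hca
                  rw [← hca, Bool.and_false]
            simp only [hc.2.2.1, hA, Bool.not_true, Bool.false_eq_true, if_false, dif_neg hne]
            split_ifs with h1 h2 h3 h4
            all_goals first
              | exact hB.symm
              | exact absurd hna h4
      · -- first char not ASCII alnum: both sides are false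
        simp only [Bool.not_eq_true] at hA
        have hA2 : PySem.Chars.isalnum c = false := by rw [hc.2.2.1, hA]
        simp only [hA, Bool.not_false, if_true]
        split_ifs <;> simp_all
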